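-- pv_equiv track=rewrite | github.com/tahorst/wcm-user | metabolic-network/find_valid_connections.py | get_mappings
-- ===== SOURCE A (Python) =====
-- def get_mappings(reactions, map_reactants):
-- 	# type: (Dict[str, Dict[str, int]], bool) -> (Dict[str, List[str]], Dict[str, List[str]])
-- 	"""
-- 	Mappings of metabolites to reactions and reactions to metabolites for easy
-- 	parsing of all reactions.
--
-- 	Args:
-- 		reactions: sim_data stoichiometry structure
-- 		map_reactants: True if mapping for reactants, False if mapping for products
--
-- 	Returns:
-- 		met_to_rxn: map each metabolite (reactant or product) to reactions that
-- 			contain it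
-- 		rxn_to_met: map each reaction to metabolites that are either reactants
-- 			or products
-- 	"""
--
-- 	if map_reactants:
-- 		direction = -1
-- 	else:
-- 		direction = 1
--
-- 	met_to_rxn = {}
-- 	rxn_to_met = {}
-- 	for rxn, stoich in reactions.items():
-- 		for met, factor in stoich.items():
-- 			if factor * direction > 0:
-- 				met_to_rxn[met] = met_to_rxn.get(met, []) + [rxn]
-- 				rxn_to_met[rxn] = rxn_to_met.get(rxn, []) + [met]
--
-- 	return met_to_rxn, rxn_to_met
-- ===== SOURCE B (Python) =====
-- def get_mappings(reactions, map_reactants):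
-- 	"""Build rxn_to_met per reaction as a complete filtered list (skipping
-- 	reactions with no qualifying metabolite), then compute met_to_rxn
-- 	declaratively: dedup the metabolites for key order and, for each
-- 	metabolite, scan rxn_to_met once by membership."""
--
-- 	direction = -1 if map_reactants else 1
--
-- 	rxn_to_met = {}
-- 	for rxn, stoich in reactions.items():
-- 		mets = [met for met, factor in stoich.items() if factor * direction > 0]
-- 		if mets:
-- 			rxn_to_met[rxn] = mets
--
-- 	order = dict.fromkeys(met for mets in rxn_to_met.values() for met in mets)
-- 	met_to_rxn = {met: [rxn for rxn, mets in rxn_to_met.items() if met in mets]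
-- 	              for met in order}
--
-- 	return met_to_rxn, rxn_to_met
-- ===== Notes on version B (the rewrite author's own statement) =====
-- stated objective: alternative
-- what changed: B never appends to per-metabolite lists: it builds rxn_to_met per reaction as one complete filtered list (skipping empty reactions), then computes met_to_rxn declaratively by deduplicating the metabolites for key order and, for each metabolite, collecting the reactions whose list contains it via a membership scan, instead of A's fused loop that grows both dicts entry by entry with get()+concat.
import Mathlib
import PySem

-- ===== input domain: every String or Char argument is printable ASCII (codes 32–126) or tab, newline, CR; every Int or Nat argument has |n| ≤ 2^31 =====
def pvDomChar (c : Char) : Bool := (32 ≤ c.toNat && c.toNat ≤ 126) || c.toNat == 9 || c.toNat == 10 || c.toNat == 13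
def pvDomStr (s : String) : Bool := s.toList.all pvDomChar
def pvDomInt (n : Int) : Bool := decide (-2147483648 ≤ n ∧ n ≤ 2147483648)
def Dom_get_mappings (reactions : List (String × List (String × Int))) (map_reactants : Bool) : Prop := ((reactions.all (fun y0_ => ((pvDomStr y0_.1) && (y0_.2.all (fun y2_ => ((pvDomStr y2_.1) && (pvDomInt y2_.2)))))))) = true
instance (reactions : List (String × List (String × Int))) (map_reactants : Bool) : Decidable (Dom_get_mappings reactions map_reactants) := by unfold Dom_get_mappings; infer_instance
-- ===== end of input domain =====

-- B builds rxn_to_met as one complete filtered list per reaction and derives met_to_rxn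
-- declaratively (dedup for key order + per-metabolite membership scans) instead of A's
-- fused loop growing both dicts entry by entry (alternative decomposition, similar cost).


-- ===== PORT A =====
def get_mappings (reactions : List (String × List (String × Int))) (map_reactants : Bool) : (List (String × List String)) × (List (String × List String)) :=
  let direction : Int := if map_reactants then -1 else 1
  let st := reactions.foldl
    (fun (st : PySem.Dict String (List String) × PySem.Dict String (List String)) rs =>
      rs.2.foldl
        (fun st mf =>
          if mf.2 * direction > 0 then
            (st.1.insert mf.1 (st.1.getD mf.1 [] ++ [rs.1]),
             st.2.insert rs.1 (st.2.getD rs.1 [] ++ [mf.1]))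
          else st)
        st)
    (PySem.Dict.empty, PySem.Dict.empty)
  (st.1.items, st.2.items)

-- ===== PORT B =====
def get_mappings_alt (reactions : List (String × List (String × Int))) (map_reactants : Bool) : (List (String × List String)) × (List (String × List String)) :=
  let direction : Int := if map_reactants then -1 else 1
  -- pass 1: one complete filtered list per reaction; skip reactions with no qualifying metabolite
  let rxnToMet : PySem.Dict String (List String) := reactions.foldl
    (fun d rs =>
      let mets := (rs.2.filter (fun mf => mf.2 * direction > 0)).map (·.1)
      if mets.isEmpty then d else d.insert rs.1 mets)
    PySem.Dict.empty
  -- key order = first occurrence of each metabolite ('dict.fromkeys')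
  let order := PySem.List.dedup (rxnToMet.items.flatMap (·.2))
  -- per metabolite: the reactions whose list contains it ('met in mets'), a membership scan
  let metToRxn : PySem.Dict String (List String) := order.foldl
    (fun d met => d.insert met ((rxnToMet.items.filter (fun p => p.2.contains met)).map (·.1)))
    PySem.Dict.empty
  (metToRxn.items, rxnToMet.items)

-- ===== PRECONDITION & SPEC =====
-- Pre_ excludes association lists with a duplicate reaction id or a duplicate metabolite id
-- within one stoichiometry: the Python inputs are dicts, which cannot contain duplicate keys,
-- so such lists represent no dict input A is ever given.
def Pre_get_mappings (reactions : List (String × List (String × Int))) (map_reactants : Bool) : Prop :=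
  (reactions.map (·.1)).Nodup ∧ ∀ rs ∈ reactions, (rs.2.map (·.1)).Nodup
instance (reactions : List (String × List (String × Int))) (map_reactants : Bool) : Decidable (Pre_get_mappings reactions map_reactants) := by unfold Pre_get_mappings; infer_instance
def pvWitness_get_mappings : (List (String × List (String × Int))) × Bool :=
  ([("r1", [("a", -1), ("b", 1)]), ("r2", [("a", 2)])], true)
def Spec_get_mappings (reactions : List (String × List (String × Int))) (map_reactants : Bool) (out : (List (String × List String)) × (List (String × List String))) : Prop := out = get_mappings_alt reactions map_reactants
instance (reactions : List (String × List (String × Int))) (map_reactants : Bool) (out : (List (String × List String)) × (List (String × List String))) : Decidable (Spec_get_mappings reactions map_reactants out) := by unfold Spec_get_mappings; infer_instance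

-- ===== CLAIM (what is proved, stated in full; the proofs are below) =====
def Claim_equal_get_mappings : Prop := ∀ (reactions : List (String × List (String × Int))) (map_reactants : Bool), Dom_get_mappings reactions map_reactants → Pre_get_mappings reactions map_reactants → Spec_get_mappings reactions map_reactants (get_mappings reactions map_reactants)

-- ===== LEMMAS AND PROOFS =====

-- the metabolites of one stoichiometry passing the sign filter, in order
def pvF (d : Int) (L : List (String × Int)) : List String :=
  (L.filter (fun mf => mf.2 * d > 0)).map (·.1)

-- all (met, rxn) update events of A's fused loop, in processing order
def pvFlat (d : Int) (reactions : List (String × List (String × Int))) : List (String × String) :=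
  reactions.flatMap (fun rs => (pvF d rs.2).map (fun met => (met, rs.1)))

def pvMupd (m : PySem.Dict String (List String)) (p : String × String) : PySem.Dict String (List String) :=
  m.modify p.1 [] (· ++ [p.2])

def pvRstep (d : Int) (r : PySem.Dict String (List String)) (rs : String × List (String × Int)) : PySem.Dict String (List String) :=
  (pvF d rs.2).foldl (fun r met => r.modify rs.1 [] (· ++ [met])) r

theorem pv_inner_A (d : Int) (rxn : String) :
    ∀ (L : List (String × Int)) (m r : PySem.Dict String (List String)),
      L.foldl
        (fun (st : PySem.Dict String (List String) × PySem.Dict String (List String)) mf =>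
          if mf.2 * d > 0 then
            (st.1.insert mf.1 (st.1.getD mf.1 [] ++ [rxn]),
             st.2.insert rxn (st.2.getD rxn [] ++ [mf.1]))
          else st)
        (m, r)
      = (((pvF d L).map (fun met => (met, rxn))).foldl pvMupd m,
         (pvF d L).foldl (fun r met => r.modify rxn [] (· ++ [met])) r) := by
  intro L
  induction L with
  | nil => intro m r; rfl
  | cons mf L ih =>
    intro m r
    by_cases h : mf.2 * d > 0
    · simp only [List.foldl_cons, pvF, List.filter_cons, h, decide_true]
      exact ih _ _
    · simp only [List.foldl_cons, pvF, List.filter_cons, h, decide_false]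
      exact ih m r

theorem pv_outer_A (d : Int) :
    ∀ (reactions : List (String × List (String × Int))) (m r : PySem.Dict String (List String)),
      reactions.foldl
        (fun (st : PySem.Dict String (List String) × PySem.Dict String (List String)) rs =>
          rs.2.foldl
            (fun st mf =>
              if mf.2 * d > 0 then
                (st.1.insert mf.1 (st.1.getD mf.1 [] ++ [rs.1]),
                 st.2.insert rs.1 (st.2.getD rs.1 [] ++ [mf.1]))
              else st)
            st)
        (m, r)
      = ((pvFlat d reactions).foldl pvMupd m, reactions.foldl (pvRstep d) r) := by
  intro reactions
  induction reactions with
  | nil => intro m r; rfl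
  | cons rs reactions ih =>
    intro m r
    simp only [List.foldl_cons, pvFlat, List.flatMap_cons, List.foldl_append]
    rw [pv_inner_A d rs.1 rs.2 m r, ih]
    rfl

-- a run of modifies at one constant key, nonempty payload
theorem pv_const_key (k : String) :
    ∀ (Fl : List String) (r : PySem.Dict String (List String)), Fl ≠ [] →
      Fl.foldl (fun r met => r.modify k [] (· ++ [met])) r = r.insert k (r.getD k [] ++ Fl) := by
  intro Fl
  induction Fl with
  | nil => intro r h; exact absurd rfl h
  | cons met Fl ih =>
    intro r _
    by_cases hF : Fl = []
    · subst hF; rfl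
    · simp only [List.foldl_cons]
      show Fl.foldl _ (r.insert k (r.getD k [] ++ [met])) = _
      rw [ih _ hF, PySem.Dict.getD_insert_self, PySem.Dict.insert_insert_self, List.append_assoc,
        List.singleton_append]

-- A's rxn_to_met items, under Nodup reaction ids
theorem pv_items_R (d : Int) :
    ∀ (reactions : List (String × List (String × Int))) (r : PySem.Dict String (List String)),
      (∀ rs ∈ reactions, r.contains rs.1 = false) →
      (reactions.map (·.1)).Nodup →
      (reactions.foldl (pvRstep d) r).items
        = r.items ++ reactions.flatMap (fun rs => if pvF d rs.2 = [] then [] else [(rs.1, pvF d rs.2)]) := by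
  intro reactions
  induction reactions with
  | nil => intro r _ _; simp
  | cons rs reactions ih =>
    intro r hfresh hnd
    simp only [List.map_cons, List.nodup_cons] at hnd
    by_cases hF : pvF d rs.2 = []
    · have hstep : pvRstep d r rs = r := by simp [pvRstep, hF]
      simp only [List.foldl_cons, hstep, List.flatMap_cons, hF]
      exact ih r (fun x hx => hfresh x (List.mem_cons_of_mem _ hx)) hnd.2
    · have hc : r.contains rs.1 = false := hfresh rs (List.mem_cons_self ..)
      have hstep : pvRstep d r rs = r.insert rs.1 (pvF d rs.2) := by
        rw [pvRstep, pv_const_key rs.1 _ r hF, PySem.Dict.getD_of_not_contains r [] hc, List.nil_append]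
      have hfresh' : ∀ x ∈ reactions, (r.insert rs.1 (pvF d rs.2)).contains x.1 = false := by
        intro x hx
        rw [PySem.Dict.contains_insert]
        have hne : x.1 ≠ rs.1 := by
          intro he
          exact hnd.1 (he ▸ List.mem_map_of_mem hx)
        simp [hne, hfresh x (List.mem_cons_of_mem _ hx)]
      simp only [List.foldl_cons, hstep, List.flatMap_cons, if_neg hF]
      rw [ih _ hfresh' hnd.2, PySem.Dict.items_insert_of_not_contains r (pvF d rs.2) hc, List.append_assoc]

-- the 'skip-empty' flatMap IS filter-then-map
theorem pv_flat_if_eq (d : Int) (reactions : List (String × List (String × Int))) :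
    reactions.flatMap (fun rs => if pvF d rs.2 = [] then [] else [(rs.1, pvF d rs.2)])
    = (reactions.filter (fun rs => !decide (pvF d rs.2 = []))).map (fun rs => (rs.1, pvF d rs.2)) := by
  induction reactions with
  | nil => rfl
  | cons rs reactions ih =>
    by_cases hF : pvF d rs.2 = [] <;>
      simp [List.flatMap_cons, hF, ih]

-- the events are exactly the flatMap over the nonempty rows
theorem pv_flat_eq_rows (d : Int) (reactions : List (String × List (String × Int))) :
    pvFlat d reactions
    = ((reactions.filter (fun rs => !decide (pvF d rs.2 = []))).map
        (fun rs => (rs.1, pvF d rs.2))).flatMap (fun p => p.2.map (fun met => (met, p.1))) := by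
  rw [List.flatMap_map, pvFlat]
  induction reactions with
  | nil => rfl
  | cons rs reactions ih =>
    by_cases hF : pvF d rs.2 = [] <;>
      simp [List.flatMap_cons, hF, ih]

-- one row's contribution to the events with this met: [rxn] if the row contains it
theorem pv_row (rxn met : String) :
    ∀ (ms : List String), ms.Nodup →
      ((ms.map (fun m => (m, rxn))).filter (fun q => q.1 == met)).map (·.2)
      = if ms.contains met then [rxn] else [] := by
  intro ms
  induction ms with
  | nil => intro _; rfl
  | cons m ms ih =>
    intro hnd
    simp only [List.nodup_cons] at hnd
    by_cases hm : m = met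
    · subst hm
      have htail : (ms.map (fun x => (x, rxn))).filter (fun q => q.1 == m) = [] := by
        rw [List.filter_eq_nil_iff]
        intro q hq
        obtain ⟨x, hx, rfl⟩ := List.mem_map.mp hq
        intro he
        exact hnd.1 (eq_of_beq he ▸ hx)
      simp [htail]
    · have h1 : ((m, rxn).1 == met) = false := by simp [hm]
      simp only [List.map_cons, List.filter_cons, h1, Bool.false_eq_true, if_false,
        List.contains_cons, ih hnd.2]
      have h2 : ¬(met = m) := fun h => hm h.symm
      simp [h2]

-- per-metabolite value: events with this met, vs. rows whose list contains it
theorem pv_val (met : String) :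
    ∀ (RI : List (String × List String)), (∀ p ∈ RI, p.2.Nodup) →
      ((RI.flatMap (fun p => p.2.map (fun m => (m, p.1)))).filter (fun q => q.1 == met)).map (·.2)
      = (RI.filter (fun p => p.2.contains met)).map (·.1) := by
  intro RI
  induction RI with
  | nil => intro _; rfl
  | cons p RI ih =>
    intro hnd
    simp only [List.flatMap_cons, List.filter_append, List.map_append,
      ih (fun q hq => hnd q (List.mem_cons_of_mem _ hq)),
      pv_row p.1 met p.2 (hnd p (List.mem_cons_self ..)), List.filter_cons]
    by_cases hm : met ∈ p.2 <;> simp [hm]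

-- B's first pass IS an insert fold over the nonempty rows
theorem pv_B_rxn (d : Int) :
    ∀ (reactions : List (String × List (String × Int))) (dd : PySem.Dict String (List String)),
      reactions.foldl
        (fun dd rs => if (pvF d rs.2).isEmpty then dd else dd.insert rs.1 (pvF d rs.2)) dd
      = (reactions.filter (fun rs => !decide (pvF d rs.2 = []))).foldl
          (fun dd rs => dd.insert rs.1 (pvF d rs.2)) dd := by
  intro reactions
  induction reactions with
  | nil => intro dd; rfl
  | cons rs reactions ih =>
    intro dd
    rw [List.foldl_cons, List.filter_cons]
    by_cases hF : pvF d rs.2 = []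
    · rw [if_pos (by simp [hF]), if_neg (by simp [hF])]
      exact ih dd
    · rw [if_neg (by simp [hF]), if_pos (by simp [hF]), List.foldl_cons]
      exact ih _

theorem get_mappings_eq (reactions : List (String × List (String × Int))) (map_reactants : Bool)
    (hpre : Pre_get_mappings reactions map_reactants) :
    get_mappings reactions map_reactants = get_mappings_alt reactions map_reactants := by
  obtain ⟨hnd, hnd2⟩ := hpre
  unfold get_mappings get_mappings_alt
  dsimp only
  set d : Int := if map_reactants then -1 else 1 with hd
  rw [pv_outer_A d reactions PySem.Dict.empty PySem.Dict.empty]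
  -- the nonempty rows, as an items list
  set RI : List (String × List String) :=
    (reactions.filter (fun rs => !decide (pvF d rs.2 = []))).map (fun rs => (rs.1, pvF d rs.2)) with hRI
  -- each row's metabolite list is duplicate-free
  have hRInd : ∀ p ∈ RI, p.2.Nodup := by
    intro p hp
    obtain ⟨rs, hrs, rfl⟩ := List.mem_map.mp hp
    have hrs' : rs ∈ reactions := List.mem_of_mem_filter hrs
    exact (hnd2 rs hrs').sublist (List.Sublist.map _ List.filter_sublist)
  -- A's rxn_to_met items = RI
  have hAR : (reactions.foldl (pvRstep d) PySem.Dict.empty).items = RI := by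
    rw [pv_items_R d reactions PySem.Dict.empty (fun rs _ => PySem.Dict.contains_empty rs.1) hnd,
      pv_flat_if_eq]
    rfl
  -- B's rxn_to_met items = RI
  have hBfold : reactions.foldl
      (fun (dd : PySem.Dict String (List String)) rs =>
        if (((rs.2.filter (fun mf => mf.2 * d > 0)).map (·.1)).isEmpty) then dd
        else dd.insert rs.1 ((rs.2.filter (fun mf => mf.2 * d > 0)).map (·.1)))
      PySem.Dict.empty
      = (reactions.filter (fun rs => !decide (pvF d rs.2 = []))).foldl
          (fun dd rs => dd.insert rs.1 (pvF d rs.2)) PySem.Dict.empty := pv_B_rxn d reactions _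
  have hfiltnd : ((reactions.filter (fun rs => !decide (pvF d rs.2 = []))).map (·.1)).Nodup :=
    hnd.sublist (List.Sublist.map _ List.filter_sublist)
  have hBR : ((reactions.filter (fun rs => !decide (pvF d rs.2 = []))).foldl
      (fun dd rs => dd.insert rs.1 (pvF d rs.2)) PySem.Dict.empty).items = RI := by
    rw [PySem.Dict.items_foldl_insert_fresh
      (List.filter (fun rs => !decide (pvF d rs.2 = [])) reactions)
      (fun rs => rs.1) (fun rs => pvF d rs.2) PySem.Dict.empty
      (fun a _ => PySem.Dict.contains_empty a.1) hfiltnd]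
    rfl
  -- the event stream is the flatMap over RI
  have hflat : pvFlat d reactions = RI.flatMap (fun p => p.2.map (fun met => (met, p.1))) :=
    pv_flat_eq_rows d reactions
  -- A's met_to_rxn dict
  set M : PySem.Dict String (List String) := (pvFlat d reactions).foldl pvMupd PySem.Dict.empty with hM
  have hMfold : M = (pvFlat d reactions).foldl
      (fun m p => m.modify p.1 [] (· ++ [p.2])) PySem.Dict.empty := rfl
  have hMkeysnd : M.keys.Nodup := by
    rw [hMfold]
    exact PySem.Dict.nodup_keys_foldl_modify_key (pvFlat d reactions) (fun p => p.1) []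
      (fun (_ : PySem.Dict String (List String)) (p : String × String) (v : List String) => v ++ [p.2])
      PySem.Dict.empty (by simp [PySem.Dict.keys_empty])
  have hMkeys : M.keys = PySem.Set.ofList ((pvFlat d reactions).map (·.1)) := by
    rw [hMfold, PySem.Dict.keys_foldl_modify_key]
    rfl
  have hMget : ∀ met, M.getD met [] = ((pvFlat d reactions).filter (fun q => q.1 == met)).map (·.2) := by
    intro met
    rw [hMfold, PySem.Dict.getD_foldl_modify_append, PySem.Dict.getD_empty, List.nil_append]
  -- key order agrees: first occurrences of metabolites
  have hkeys : M.keys = PySem.List.dedup (RI.flatMap (·.2)) := by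
    rw [hMkeys, PySem.List.dedup_eq_ofList, hflat, List.map_flatMap]
    have hfn : (fun (p : String × List String) =>
        List.map (fun (x : String × String) => x.1) (List.map (fun met => (met, p.1)) p.2))
        = fun p => p.2 := by
      funext p
      simp [List.map_map, Function.comp_def]
    rw [hfn]
  -- values agree pointwise
  have hval : ∀ met, M.getD met []
      = (RI.filter (fun p => p.2.contains met)).map (·.1) := by
    intro met
    rw [hMget, hflat, pv_val met RI hRInd]
  -- B's met_to_rxn items
  have hordnd : ((PySem.List.dedup (RI.flatMap (·.2))).map (fun met => met)).Nodup := by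
    simp only [List.map_id_fun']
    exact PySem.List.nodup_dedup _
  have hBM : ((PySem.List.dedup (RI.flatMap (·.2))).foldl
      (fun dd met => dd.insert met ((RI.filter (fun p => p.2.contains met)).map (·.1)))
      PySem.Dict.empty).items
      = (PySem.List.dedup (RI.flatMap (·.2))).map
          (fun met => (met, (RI.filter (fun p => p.2.contains met)).map (·.1))) := by
    rw [PySem.Dict.items_foldl_insert_fresh
      (PySem.List.dedup (RI.flatMap (·.2))) (fun met => met)
      (fun met => (RI.filter (fun p => p.2.contains met)).map (·.1)) PySem.Dict.empty
      (fun a _ => PySem.Dict.contains_empty a) hordnd]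
    rfl
  -- assemble
  refine Prod.ext ?_ ?_
  · show M.items = _
    rw [PySem.Dict.items_eq_map_keys M hMkeysnd [], hkeys]
    rw [hBfold, hBR, hBM]
    exact List.map_congr_left (fun met _ => by rw [hval met])
  · show (reactions.foldl (pvRstep d) PySem.Dict.empty).items = _
    rw [hAR, hBfold, hBR]

-- ===== VERDICT (by name: the statement is the Claim_ definition above) =====
theorem get_mappings_spec : Claim_equal_get_mappings := by
  intro reactions map_reactants _ hpre
  exact get_mappings_eq reactions map_reactants hpre
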